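-- pv_equiv track=rewrite | github.com/miliar/Code_Jam_Webscraper | solutions_python/Problem_181/834.py | WinningWord
-- ===== SOURCE A (Python) =====
-- def WinningWord(inputString):
-- 	result = ""
-- 	for letter in inputString:
-- 		if not result or result[0] > letter:
-- 			result = result + letter
-- 		else:
-- 			result = letter + result
--
-- 	return result
-- ===== SOURCE B (Python) =====
-- def WinningWord(inputString):
--     if not inputString:
--         return ""
--     # Stage 1: prefix maxima pm[i] = max(inputString[:i+1])
--     pm = []
--     m = inputString[0]
--     for c in inputString:
--         if c > m:
--             m = c
--         pm.append(m)
--     # Stage 2: a letter (after the first) goes to the FRONT iff it ties or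
--     # beats the maximum of all letters before it; otherwise to the BACK.
--     pairs = list(zip(pm, inputString[1:]))
--     fronts = [c for p, c in pairs if c >= p]
--     backs = [c for p, c in pairs if c < p]
--     # Stage 3: assemble once.
--     return ''.join(reversed(fronts)) + inputString[0] + ''.join(backs)
-- ===== Notes on version B (the rewrite author's own statement) =====
-- stated objective: faster
-- what changed: B does not simulate A's string construction at all: it first computes the prefix-maximum array of the input, then partitions the remaining letters by comparing each with the prefix maximum of the letters before it (a closed characterization of A's prepend/append rule), and assembles the answer in one final join.
import Mathlib
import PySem

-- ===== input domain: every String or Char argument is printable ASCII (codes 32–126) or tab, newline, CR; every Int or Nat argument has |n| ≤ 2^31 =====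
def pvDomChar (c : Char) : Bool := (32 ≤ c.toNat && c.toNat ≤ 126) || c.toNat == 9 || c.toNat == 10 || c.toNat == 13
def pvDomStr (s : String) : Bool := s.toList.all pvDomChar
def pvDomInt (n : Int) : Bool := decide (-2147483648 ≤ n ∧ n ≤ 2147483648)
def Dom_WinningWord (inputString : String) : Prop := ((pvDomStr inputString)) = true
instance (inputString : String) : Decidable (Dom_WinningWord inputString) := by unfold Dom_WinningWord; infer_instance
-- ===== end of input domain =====

-- B replaces A's incremental prepend/append string rebuilding by a staged computation:
-- prefix-maximum array, then a partition of the letters by comparison with it, then one join.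

-- ===== PORT A =====
-- result kept as List Char; 'result + letter' = append, 'letter + result' = prepend.
def WinningWordGoA (result : List Char) (letters : List Char) : List Char :=
  match letters with
  | [] => result
  | c :: cs =>
    match result with
    | [] => WinningWordGoA (result ++ [c]) cs
    | h :: _ => if h > c then WinningWordGoA (result ++ [c]) cs
                else WinningWordGoA (c :: result) cs

def WinningWord (inputString : String) : String :=
  String.ofList (WinningWordGoA [] inputString.toList)

-- ===== PORT B =====
-- Stage 1 of Source B: the prefix-maximum list (m updated, then appended).
def WinningWordPm (m : Char) (acc : List Char) (letters : List Char) : List Char :=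
  match letters with
  | [] => acc
  | c :: cs =>
    let m' := if c > m then c else m
    WinningWordPm m' (acc ++ [m']) cs

def WinningWord_alt (inputString : String) : String :=
  match inputString.toList with
  | [] => ""
  | c0 :: cs =>
    let pm := WinningWordPm c0 [] (c0 :: cs)
    let pairs := pm.zip cs
    let fronts := (pairs.filter (fun pc => pc.2 ≥ pc.1)).map Prod.snd
    let backs := (pairs.filter (fun pc => pc.2 < pc.1)).map Prod.snd
    String.ofList (fronts.reverse ++ c0 :: backs)

-- ===== PRECONDITION & SPEC =====
def Spec_WinningWord (inputString : String) (out : String) : Prop := out = WinningWord_alt inputString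
instance (inputString : String) (out : String) : Decidable (Spec_WinningWord inputString out) := by unfold Spec_WinningWord; infer_instance

-- ===== CLAIM (what is proved, stated in full; the proofs are below) =====
def Claim_equal_WinningWord : Prop := ∀ (inputString : String), Dom_WinningWord inputString → Spec_WinningWord inputString (WinningWord inputString)

-- ===== LEMMAS AND PROOFS =====

-- Proof-side description of the partition relative to a running maximum m:
-- (letters that tie or beat it, in order; letters below it, in order).
def WinningWordFB (m : Char) : List Char → List Char × List Char
  | [] => ([], [])
  | c :: cs =>
    if m > c then let p := WinningWordFB m cs; (p.1, c :: p.2)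
    else let p := WinningWordFB c cs; (c :: p.1, p.2)

-- A's loop, started from result = l.reverse ++ r with head m, ends at
-- (l ++ fronts).reverse ++ (r ++ backs).
theorem WinningWordGoA_eq (letters : List Char) :
    ∀ (l r : List Char) (m : Char), r ≠ [] → (l.reverse ++ r).head? = some m →
    WinningWordGoA (l.reverse ++ r) letters
      = (l ++ (WinningWordFB m letters).1).reverse ++ (r ++ (WinningWordFB m letters).2) := by
  induction letters with
  | nil => intro l r m _ _; simp [WinningWordGoA, WinningWordFB]
  | cons c cs ih =>
    intro l r m hr hm
    have hne : l.reverse ++ r ≠ [] := by simp [hr]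
    obtain ⟨h, t, ht⟩ := List.exists_cons_of_ne_nil hne
    have hhm : m = h := by rw [ht] at hm; simpa using hm.symm
    subst hhm
    rw [WinningWordGoA.eq_def, WinningWordFB.eq_def]
    rw [ht]
    by_cases hc : m > c
    · simp only [hc, if_pos]
      rw [← ht, List.append_assoc]
      rw [ih l (r ++ [c]) m (by simp) (by rw [← List.append_assoc, ht]; simp)]
      simp
    · simp only [hc, if_false]
      rw [← ht]
      rw [show c :: (l.reverse ++ r) = (l ++ [c]).reverse ++ r from by simp]
      rw [ih (l ++ [c]) r c hr (by simp)]
      simp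

-- the accumulator of the prefix-max pass just collects output
theorem WinningWordPm_acc (letters : List Char) :
    ∀ (m : Char) (acc : List Char),
      WinningWordPm m acc letters = acc ++ WinningWordPm m [] letters := by
  induction letters with
  | nil => intro m acc; simp [WinningWordPm]
  | cons c cs ih =>
    intro m acc
    have e1 : WinningWordPm m acc (c :: cs)
        = WinningWordPm (if c > m then c else m) (acc ++ [if c > m then c else m]) cs := rfl
    have e2 : WinningWordPm m [] (c :: cs)
        = WinningWordPm (if c > m then c else m) ([] ++ [if c > m then c else m]) cs := rfl
    rw [e1, e2, ih (if c > m then c else m) (acc ++ [if c > m then c else m]),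
        ih (if c > m then c else m) ([] ++ [if c > m then c else m])]
    simp

-- zipping (m :: prefix maxima) with the letters and filtering is exactly the partition
theorem WinningWord_zip_filter (letters : List Char) :
    ∀ (m : Char),
      (((m :: WinningWordPm m [] letters).zip letters).filter
          (fun pc => pc.2 ≥ pc.1)).map Prod.snd = (WinningWordFB m letters).1
      ∧ (((m :: WinningWordPm m [] letters).zip letters).filter
          (fun pc => pc.2 < pc.1)).map Prod.snd = (WinningWordFB m letters).2 := by
  induction letters with
  | nil => intro m; simp [WinningWordFB]
  | cons c cs ih =>
    intro m
    have hpm : WinningWordPm m [] (c :: cs)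
        = (if c > m then c else m) :: WinningWordPm (if c > m then c else m) [] cs := by
      have e : WinningWordPm m [] (c :: cs)
          = WinningWordPm (if c > m then c else m) ([] ++ [if c > m then c else m]) cs := rfl
      rw [e, WinningWordPm_acc cs (if c > m then c else m) ([] ++ [if c > m then c else m])]
      simp
    rw [hpm, WinningWordFB.eq_def]
    by_cases hc : m > c
    · have hm' : (if c > m then c else m) = m := by
        have : ¬ c > m := by exact lt_asymm hc
        simp [this]
      have hge : ¬ (c ≥ m) := not_le.mpr hc
      simp only [hc, if_pos, hm']
      constructor
      · simp [List.zip_cons_cons, hge, (ih m).1]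
      · simp [List.zip_cons_cons, hc, (ih m).2]
    · have hge : c ≥ m := le_of_not_gt hc
      have hm' : (if c > m then c else m) = c := by
        rcases lt_or_eq_of_le hge with h | h
        · simp [h]
        · simp [← h]
      simp only [hc, if_false, hm']
      constructor
      · simp [List.zip_cons_cons, hge, (ih c).1]
      · simp [List.zip_cons_cons, not_lt.mpr hge, (ih c).2]

-- ===== VERDICT (by name: the statement is the Claim_ definition above) =====
theorem WinningWord_spec : Claim_equal_WinningWord := by
  intro s _
  unfold Spec_WinningWord WinningWord WinningWord_alt
  cases hs : s.toList with
  | nil => rfl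
  | cons c0 cs =>
    have hA : WinningWordGoA [] (c0 :: cs) = WinningWordGoA [c0] cs := rfl
    have hpm0 : WinningWordPm c0 [] (c0 :: cs) = c0 :: WinningWordPm c0 [] cs := by
      have e : WinningWordPm c0 [] (c0 :: cs)
          = WinningWordPm (if c0 > c0 then c0 else c0) ([] ++ [if c0 > c0 then c0 else c0]) cs := rfl
      rw [e, WinningWordPm_acc cs (if c0 > c0 then c0 else c0) ([] ++ [if c0 > c0 then c0 else c0])]
      simp
    simp only [hA, hpm0]
    rw [show ([c0] : List Char) = ([] : List Char).reverse ++ [c0] from by simp]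
    rw [WinningWordGoA_eq cs [] [c0] c0 (by simp) (by simp)]
    obtain ⟨h1, h2⟩ := WinningWord_zip_filter cs c0
    simp [h1, h2]
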